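-- pv_equiv track=rewrite | github.com/baudren/advent-of-code | 2023/day13.py | find_col_symmetry
-- ===== SOURCE A (Python) =====
-- def find_col_symmetry(pattern, already=0):
--     match = True
--     for col in range(1,len(pattern[0])):
--         # try each row
--         match = True
--         for row in pattern:
--             start = row[col-1::-1]
--             end = row[col:]
--             if len(start) < len(end):
--                 if not end.startswith(start):
--                     match = False
--                     break
--             else:
--                 if not start.startswith(end):
--                     match = False
--                     break
--         if not already and match:
--             break
--         if match and col != already:
--             break
--     return col if match else 0
-- ===== SOURCE B (Python) =====
-- def find_col_symmetry(pattern, already=0):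
--     w = len(pattern[0])
--     cands = list(range(1, w))
--     for row in pattern:
--         n = len(row)
--         cands = [c for c in cands
--                  if all(row[c - 1 - k] == row[c + k] for k in range(min(c, n - c)))]
--     for c in cands:
--         if c != already:
--             return c
--     return 0
-- ===== Notes on version B (the rewrite author's own statement) =====
-- stated objective: alternative
-- what changed: A scans columns in an outer loop and re-checks every row per column with reversed-slice/startswith string comparisons and break-driven selection; B instead keeps one candidate-column list and filters it row by row with a direct character-index palindrome test, then returns the first surviving column != already.
-- intended difference: When already equals the last column W-1 and that is the pattern's only mirror column, A's loop falls through with match=True and returns already itself (e.g. A(["##"],1)=1) although a different column was requested, while B returns 0, the intended 'no other mirror column' answer. — e.g. on find_col_symmetry(["##"], 1): A returns 1, B returns 0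
import Mathlib
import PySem

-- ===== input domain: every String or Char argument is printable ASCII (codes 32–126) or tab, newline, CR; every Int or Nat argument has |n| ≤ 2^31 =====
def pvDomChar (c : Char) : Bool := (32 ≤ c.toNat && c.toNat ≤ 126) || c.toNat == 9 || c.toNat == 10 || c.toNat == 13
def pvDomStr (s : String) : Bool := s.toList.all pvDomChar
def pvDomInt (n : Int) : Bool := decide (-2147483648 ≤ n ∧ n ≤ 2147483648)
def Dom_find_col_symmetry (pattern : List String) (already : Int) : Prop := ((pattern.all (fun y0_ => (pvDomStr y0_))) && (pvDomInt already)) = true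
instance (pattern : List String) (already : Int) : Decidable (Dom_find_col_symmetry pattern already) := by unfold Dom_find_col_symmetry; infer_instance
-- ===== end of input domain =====

-- B replaces A's column-outer scan (string slicing + startswith per row, with a break-driven
-- selection loop) by a row-outer filter: the candidate-column list is filtered once per row with a
-- direct character-index palindrome test, and the first surviving column ≠ already is returned
-- (objective: alternative decomposition, same asymptotic cost).

-- ===== PORT A =====
-- inner 'for row in pattern' loop of A: returns the final value of 'match'
def pvACheckRows (col : Int) : List String → Bool
  | [] => true
  | row :: rest =>
    -- start = row[col-1::-1]  (step -1 ≠ 0, so slice? never returns none; getD "" is unreachable)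
    let start := (PySem.Str.slice? row (some (col - 1)) none (-1)).getD ""
    -- end = row[col:]
    let stop := PySem.Str.slice row (some col) none
    if PySem.Str.len start < PySem.Str.len stop then
      if !(PySem.Str.startswith stop start) then false else pvACheckRows col rest
    else
      if !(PySem.Str.startswith start stop) then false else pvACheckRows col rest

-- outer 'for col in range(1, len(pattern[0]))' loop with its two breaks; state = (col, match)
def pvALoop (pattern : List String) (already : Int) : List Int → Int × Bool → Int × Bool
  | [], st => st
  | col :: rest, _ =>
    let m := pvACheckRows col pattern
    if already == 0 && m then (col, m)
    else if m && (col != already) then (col, m)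
    else pvALoop pattern already rest (col, m)

def find_col_symmetry (pattern : List String) (already : Int) : Int :=
  -- pattern[0]: Pre_ excludes pattern = [] (IndexError); Pre_ also guarantees the range is
  -- nonempty, so the placeholder initial state (0, true) (Python: 'col' unbound) is never returned
  let w := PySem.Str.len ((PySem.List.pyGet? pattern 0).getD "")
  let res := pvALoop pattern already (PySem.List.pyRange 1 w 1) (0, true)
  if res.2 then res.1 else 0

-- ===== PORT B =====
-- all(row[c-1-k] == row[c+k] for k in range(min(c, n - c))); the indices are always in range
-- there, so pyGet? returns some and the getD default is unreachable
def pvMirror (row : String) (c : Int) : Bool :=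
  let n := PySem.Str.len row
  (PySem.List.pyRange 0 (min c (n - c)) 1).all fun k =>
    (PySem.Str.pyGet? row (c - 1 - k)).getD ' ' == (PySem.Str.pyGet? row (c + k)).getD ' '

-- final 'for c in cands: if c != already: return c' / 'return 0'
def pvFirstNe : List Int → Int → Int
  | [], _ => 0
  | c :: rest, already => if c != already then c else pvFirstNe rest already

def find_col_symmetry_alt (pattern : List String) (already : Int) : Int :=
  let w := PySem.Str.len ((PySem.List.pyGet? pattern 0).getD "")
  let cands := pattern.foldl (fun cs row => cs.filter (fun c => pvMirror row c)) (PySem.List.pyRange 1 w 1)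
  pvFirstNe cands already

-- ===== PRECONDITION & SPEC =====
-- Pre_ excludes only the inputs on which A raises: pattern = [] (IndexError on pattern[0]) and
-- width < 2 (the column loop never runs, so 'col' is unbound at the return).
def Pre_find_col_symmetry (pattern : List String) (already : Int) : Prop :=
  pattern ≠ [] ∧ 2 ≤ (pattern.headD "").toList.length

instance (pattern : List String) (already : Int) : Decidable (Pre_find_col_symmetry pattern already) := by
  unfold Pre_find_col_symmetry; infer_instance

def pvWitness_find_col_symmetry : List String × Int := (["##"], 0)

-- spec-level mirror condition: column c mirrors row l iff the reversed left part and the right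
-- part agree on their overlap, i.e. one is a prefix of the other
def pvMirrorAt (l : List Char) (c : Nat) : Prop :=
  (l.take c).reverse <+: l.drop c ∨ l.drop c <+: (l.take c).reverse

-- When 'already' equals the last candidate column w-1 and that column is the only mirror column of
-- the whole pattern, A falls out of its loop with match=True and returns 'already' itself although
-- a different column was asked for, while B returns 0; 0 ("no new mirror column") is the intended
-- value.
def D_find_col_symmetry (pattern : List String) (already : Int) : Prop :=
  let w := (pattern.headD "").toList.length
  already = (w : Int) - 1 ∧
  ∀ c ∈ List.range w, 1 ≤ c → ((∀ row ∈ pattern, pvMirrorAt row.toList c) ↔ c = w - 1)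
instance (pattern : List String) (already : Int) : Decidable (D_find_col_symmetry pattern already) := by
  unfold D_find_col_symmetry pvMirrorAt; infer_instance

def Spec_find_col_symmetry (pattern : List String) (already : Int) (out : Int) : Prop :=
  ¬ D_find_col_symmetry pattern already → out = find_col_symmetry_alt pattern already
instance (pattern : List String) (already : Int) (out : Int) : Decidable (Spec_find_col_symmetry pattern already out) := by
  unfold Spec_find_col_symmetry; infer_instance

def pvDiffWitness_find_col_symmetry : List String × Int := (["##"], 1)
def pvDiffWitnessOut_find_col_symmetry : Int × Int := (1, 0)

-- ===== CLAIM (what is proved, stated in full; the proofs are below) =====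
def Claim_unchanged_find_col_symmetry : Prop := ∀ (pattern : List String) (already : Int), Dom_find_col_symmetry pattern already → Pre_find_col_symmetry pattern already → Spec_find_col_symmetry pattern already (find_col_symmetry pattern already)
def Claim_changed_find_col_symmetry : Prop := Dom_find_col_symmetry (pvDiffWitness_find_col_symmetry.1) (pvDiffWitness_find_col_symmetry.2) ∧ Pre_find_col_symmetry (pvDiffWitness_find_col_symmetry.1) (pvDiffWitness_find_col_symmetry.2) ∧ D_find_col_symmetry (pvDiffWitness_find_col_symmetry.1) (pvDiffWitness_find_col_symmetry.2) ∧ find_col_symmetry (pvDiffWitness_find_col_symmetry.1) (pvDiffWitness_find_col_symmetry.2) = pvDiffWitnessOut_find_col_symmetry.1 ∧ find_col_symmetry_alt (pvDiffWitness_find_col_symmetry.1) (pvDiffWitness_find_col_symmetry.2) = pvDiffWitnessOut_find_col_symmetry.2 ∧ pvDiffWitnessOut_find_col_symmetry.1 ≠ pvDiffWitnessOut_find_col_symmetry.2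
def Claim_exact_find_col_symmetry : Prop := ∀ (pattern : List String) (already : Int), Dom_find_col_symmetry pattern already → Pre_find_col_symmetry pattern already → D_find_col_symmetry pattern already → find_col_symmetry pattern already ≠ find_col_symmetry_alt pattern already
-- ===== LEMMAS AND PROOFS =====

-- pointwise form of the mirror condition at column c of a row l
def pvPtw (l : List Char) (c : Nat) : Prop :=
  ∀ k, k < min c (l.length - c) → l[c - 1 - k]? = l[c + k]?

theorem pv_prefix_point (s e : List Char) :
    s <+: e ↔ ∀ k, k < s.length → s[k]? = e[k]? := by
  rw [List.prefix_iff_eq_take]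
  constructor
  · intro he k hk
    conv_lhs => rw [he]
    simp [hk]
  · intro hp
    apply List.ext_getElem?
    intro i
    by_cases hi : i < s.length
    · rw [hp i hi]; simp [hi]
    · rw [List.getElem?_eq_none (by omega)]
      rw [List.getElem?_eq_none (by simp [List.length_take]; omega)]

theorem pv_prefix_or_iff (s e : List Char) :
    (s <+: e ∨ e <+: s) ↔ ∀ k, k < min s.length e.length → s[k]? = e[k]? := by
  constructor
  · rintro (hp | hp) k hk
    · exact (pv_prefix_point s e).mp hp k (lt_of_lt_of_le hk (min_le_left _ _))
    · exact ((pv_prefix_point e s).mp hp k (lt_of_lt_of_le hk (min_le_right _ _))).symm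
  · intro hp
    rcases le_total s.length e.length with h | h
    · exact Or.inl ((pv_prefix_point s e).mpr fun k hk => hp k (by omega))
    · exact Or.inr ((pv_prefix_point e s).mpr fun k hk => (hp k (by omega)).symm)

theorem pv_getElem?_reverse (l : List Char) (i : Nat) (h : i < l.length) :
    l.reverse[i]? = l[l.length - 1 - i]? := by
  rw [List.getElem?_eq_getElem (by simpa), List.getElem?_eq_getElem (by omega),
    List.getElem_reverse]

theorem pv_mirrorAt_iff_ptw (l : List Char) (c : Nat) : pvMirrorAt l c ↔ pvPtw l c := by
  unfold pvMirrorAt pvPtw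
  rw [pv_prefix_or_iff]
  constructor
  · intro hp k hk
    have hcn : c < l.length := by omega
    have h1 := hp k (by simp; omega)
    rw [pv_getElem?_reverse _ _ (by simp; omega), List.getElem?_drop,
      show (List.take c l).length - 1 - k = c - 1 - k by simp; omega,
      List.getElem?_take, if_pos (by omega)] at h1
    exact h1
  · intro hp k hk
    simp only [List.length_reverse, List.length_take, List.length_drop] at hk
    have hcn : c < l.length := by omega
    have h1 := hp k (by omega)
    rw [pv_getElem?_reverse _ _ (by simp; omega), List.getElem?_drop,
      show (List.take c l).length - 1 - k = c - 1 - k by simp; omega,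
      List.getElem?_take, if_pos (by omega)]
    exact h1

theorem pv_mirror_iff (row : String) (c : Int) (hc : 1 ≤ c) :
    pvMirror row c = true ↔ pvPtw row.toList c.toNat := by
  simp only [pvMirror, PySem.Str.len_eq, List.all_eq_true]
  unfold pvPtw
  constructor
  · intro hall k hk
    have hcn : c.toNat < row.toList.length := by omega
    have hmem : ((k : Nat) : Int) ∈ PySem.List.pyRange 0 (min c ((row.toList.length : Int) - c)) 1 := by
      rw [PySem.List.mem_pyRange_one]
      omega
    have h1 := hall _ hmem
    rw [show c - 1 - ((k : Nat) : Int) = ((c.toNat - 1 - k : Nat) : Int) by omega,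
        show c + ((k : Nat) : Int) = ((c.toNat + k : Nat) : Int) by omega,
        PySem.Str.pyGet?_natCast, PySem.Str.pyGet?_natCast,
        List.getElem?_eq_getElem (by omega), List.getElem?_eq_getElem (by omega)] at h1
    simp only [Option.getD_some, beq_iff_eq] at h1
    rw [List.getElem?_eq_getElem (by omega), List.getElem?_eq_getElem (by omega), h1]
  · intro hpt x hx
    rw [PySem.List.mem_pyRange_one] at hx
    have hcn : c.toNat < row.toList.length := by omega
    have h1 := hpt x.toNat (by omega)
    rw [List.getElem?_eq_getElem (by omega), List.getElem?_eq_getElem (by omega)] at h1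
    simp only [Option.some.injEq] at h1
    rw [show c - 1 - x = ((c.toNat - 1 - x.toNat : Nat) : Int) by omega,
        show c + x = ((c.toNat + x.toNat : Nat) : Int) by omega,
        PySem.Str.pyGet?_natCast, PySem.Str.pyGet?_natCast,
        List.getElem?_eq_getElem (by omega), List.getElem?_eq_getElem (by omega)]
    simp only [Option.getD_some, beq_iff_eq]
    exact h1

theorem pv_revtake (m : Nat) (l : List Char) (hml : m ≤ l.length) :
    List.filterMap (fun x : Nat => l[(((m:Int) - 1) + -(x:Int)).toNat]?) (List.range m)
      = (l.take m).reverse := by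
  induction m generalizing l with
  | zero => simp
  | succ m ih =>
    rw [List.range_succ_eq_map, List.filterMap_cons, List.filterMap_map]
    have h0 : (((m:Int) + 1 - 1) + -((0:Nat):Int)).toNat = m := by push_cast; omega
    have hm : m < l.length := by omega
    have hfun : ((fun x : Nat => l[(((m+1:Nat):Int) - 1 + -(x:Int)).toNat]?) ∘ Nat.succ)
        = fun x : Nat => l[(((m:Int) - 1) + -(x:Int)).toNat]? := by
      funext x
      simp only [Function.comp]
      congr 2
      push_cast
      omega
    simp only [Nat.cast_add, Nat.cast_one] at hfun ⊢
    rw [h0]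
    rw [List.getElem?_eq_getElem hm]
    rw [hfun, ih l (by omega)]
    rw [List.take_add_one, List.getElem?_eq_getElem hm, Option.toList_some,
      List.reverse_append]
    simp

theorem pv_slice_rev (l : List Char) (c : Int) (hc : 1 ≤ c) :
    PySem.List.slice? l (some (c - 1)) none (-1) = some ((l.take c.toNat).reverse) := by
  simp only [PySem.List.slice?, PySem.List.sliceIndices]
  norm_num
  rw [if_neg (show ¬ c < 1 by omega)]
  rcases Nat.eq_zero_or_pos l.length with h0 | hpos
  · rw [List.length_eq_zero_iff.mp h0]
    simp
  · have hs : min (c - 1) ((l.length : Int) - 1) = ((min c.toNat l.length : Nat) : Int) - 1 := by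
      push_cast; omega
    rw [hs]
    rw [if_pos (by push_cast; omega)]
    have hm1 : (((min c.toNat l.length : Nat) : Int) - 1 + 1).toNat = min c.toNat l.length := by
      push_cast; omega
    rw [hm1]
    rw [pv_revtake (min c.toNat l.length) l (by omega)]
    congr 1
    rcases le_or_gt c.toNat l.length with h | h
    · rw [min_eq_left h]
    · rw [min_eq_right (by omega), List.take_of_length_le (le_refl _),
        List.take_of_length_le (by omega)]

-- A's per-row reflection test equals B's character test
theorem pv_arow (row : String) (c : Int) (hc : 1 ≤ c) :
    (if PySem.Str.len ((PySem.Str.slice? row (some (c - 1)) none (-1)).getD "") <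
          PySem.Str.len (PySem.Str.slice row (some c) none)
     then PySem.Str.startswith (PySem.Str.slice row (some c) none)
            ((PySem.Str.slice? row (some (c - 1)) none (-1)).getD "")
     else PySem.Str.startswith ((PySem.Str.slice? row (some (c - 1)) none (-1)).getD "")
            (PySem.Str.slice row (some c) none)) = pvMirror row c := by
  have hstart : ((PySem.Str.slice? row (some (c - 1)) none (-1)).getD "").toList
      = (row.toList.take c.toNat).reverse := by
    have h1 := pv_slice_rev row.toList c hc
    simp [PySem.Str.slice?, PySem.Chars.slice?_eq_listSlice?, h1]
  have hstop : (PySem.Str.slice row (some c) none).toList = row.toList.drop c.toNat := by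
    rw [PySem.Str.toList_slice, PySem.Chars.slice_eq_listSlice]
    exact PySem.List.slice_from row.toList (by omega)
  rw [Bool.eq_iff_iff, pv_mirror_iff row c hc, ← pv_mirrorAt_iff_ptw]
  unfold pvMirrorAt
  rw [PySem.Str.len_eq, PySem.Str.len_eq, hstart, hstop,
    PySem.Str.startswith_eq, PySem.Str.startswith_eq, hstart, hstop]
  set s := (row.toList.take c.toNat).reverse with hs
  set e := row.toList.drop c.toNat with he
  by_cases hlen : s.length < e.length
  · rw [if_pos (by exact_mod_cast hlen), PySem.Chars.startswith_iff]
    constructor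
    · exact Or.inl
    · rintro (h | h)
      · exact h
      · exact absurd h.length_le (by omega)
  · rw [if_neg (by exact_mod_cast hlen), PySem.Chars.startswith_iff]
    constructor
    · exact Or.inr
    · rintro (h | h)
      · rw [h.eq_of_length (le_antisymm h.length_le (by omega))]
      · exact h

theorem pv_checkRows_eq (pattern : List String) (c : Int) (hc : 1 ≤ c) :
    pvACheckRows c pattern = pattern.all (fun row => pvMirror row c) := by
  induction pattern with
  | nil => rfl
  | cons row rest ih =>
    have h := pv_arow row c hc
    simp only [pvACheckRows, List.all_cons]
    by_cases hlen : PySem.Str.len ((PySem.Str.slice? row (some (c - 1)) none (-1)).getD "") <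
        PySem.Str.len (PySem.Str.slice row (some c) none)
    · rw [if_pos hlen] at h ⊢
      rw [← h, ih]
      cases PySem.Str.startswith (PySem.Str.slice row (some c) none)
          ((PySem.Str.slice? row (some (c - 1)) none (-1)).getD "") <;> simp
    · rw [if_neg hlen] at h ⊢
      rw [← h, ih]
      cases PySem.Str.startswith ((PySem.Str.slice? row (some (c - 1)) none (-1)).getD "")
          (PySem.Str.slice row (some c) none) <;> simp

theorem pv_foldl_filter (rows : List String) : ∀ (cs : List Int),
    rows.foldl (fun cs row => cs.filter (fun c => pvMirror row c)) cs
      = cs.filter (fun c => rows.all (fun row => pvMirror row c)) := by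
  induction rows with
  | nil => intro cs; simp
  | cons r t ih =>
    intro cs
    rw [List.foldl_cons, ih, List.filter_filter]
    apply List.filter_congr
    intro x _
    simp only [List.all_cons]
    rw [Bool.and_comm]

theorem pv_firstNe_eq (cs : List Int) (already : Int) :
    pvFirstNe cs already = (cs.find? (fun c => c != already)).getD 0 := by
  induction cs with
  | nil => rfl
  | cons c t ih =>
    show (if c != already then c else pvFirstNe t already) = _
    by_cases h : (c != already) = true
    · rw [if_pos h, List.find?_cons_of_pos (p := fun c => c != already) h]; rfl
    · rw [if_neg h, List.find?_cons_of_neg (p := fun c => c != already) h, ih]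

theorem pv_find?_filter (p q : Int → Bool) (l : List Int) :
    (l.filter q).find? p = l.find? (fun c => q c && p c) := by
  induction l with
  | nil => rfl
  | cons x t ih =>
    by_cases hq : q x = true
    · rw [List.filter_cons_of_pos hq]
      by_cases hpx : p x = true
      · rw [List.find?_cons_of_pos (p := p) hpx,
          List.find?_cons_of_pos (p := fun c => q c && p c) (by simp [hq, hpx])]
      · rw [List.find?_cons_of_neg (p := p) hpx,
          List.find?_cons_of_neg (p := fun c => q c && p c) (by simp [hq, hpx]), ih]
    · rw [List.filter_cons_of_neg hq,
        List.find?_cons_of_neg (p := fun c => q c && p c) (by simp [hq]), ih]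

theorem pv_find?_congr_mem {α : Type} (l : List α) (p q : α → Bool)
    (h : ∀ x ∈ l, p x = q x) : l.find? p = l.find? q := by
  induction l with
  | nil => rfl
  | cons x t ih =>
    simp only [List.find?_cons, h x List.mem_cons_self]
    cases q x
    · exact ih fun y hy => h y (List.mem_cons_of_mem _ hy)
    · rfl

theorem pv_aLoop_cons (pattern : List String) (already c : Int) (rest : List Int) (st : Int × Bool) :
    pvALoop pattern already (c :: rest) st
      = (if already == 0 && pvACheckRows c pattern then (c, pvACheckRows c pattern)
         else if pvACheckRows c pattern && (c != already) then (c, pvACheckRows c pattern)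
         else pvALoop pattern already rest (c, pvACheckRows c pattern)) := rfl

theorem pv_aLoop_char (pattern : List String) (already : Int) :
    ∀ (cs : List Int) (st : Int × Bool),
    (if (pvALoop pattern already cs st).2 then (pvALoop pattern already cs st).1 else 0)
      = ((cs.find? (fun c => pvACheckRows c pattern && (already == 0 || c != already))).getD
          (match cs.getLast? with
           | some lc => if pvACheckRows lc pattern then lc else 0
           | none => if st.2 then st.1 else 0)) := by
  intro cs
  induction cs with
  | nil => intro st; rfl
  | cons c rest ih =>
    intro st
    rw [pv_aLoop_cons]
    by_cases hp : (pvACheckRows c pattern && (already == 0 || c != already)) = true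
    · rw [List.find?_cons_of_pos (p := fun c => pvACheckRows c pattern && (already == 0 || c != already)) hp]
      cases hmv : pvACheckRows c pattern <;> rw [hmv] at hp
      · simp at hp
      · cases h0 : (already == (0 : Int)) <;> rw [h0] at hp
        · simp only [Bool.true_and, Bool.false_or] at hp
          simp [hp]
        · simp
    · rw [List.find?_cons_of_neg (p := fun c => pvACheckRows c pattern && (already == 0 || c != already)) hp]
      have e1 : (already == 0 && pvACheckRows c pattern) = false := by
        revert hp; cases already == 0 <;> cases pvACheckRows c pattern <;> simp
      have e2 : (pvACheckRows c pattern && (c != already)) = false := by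
        revert hp; cases pvACheckRows c pattern <;> cases already == 0 <;> cases c != already <;> simp
      rw [e1, e2]
      simp only [Bool.false_eq_true, if_false]
      rw [ih (c, pvACheckRows c pattern)]
      rcases rest with _ | ⟨d, rest'⟩
      · simp
      · rw [List.getLast?_cons_cons]
        rcases hgl : (d :: rest').getLast? with _ | lc
        · rw [List.getLast?_eq_none_iff] at hgl
          exact (List.cons_ne_nil _ _ hgl).elim
        · rfl

theorem pv_pyRange_getLast (w : Nat) (hw : 2 ≤ w) :
    (PySem.List.pyRange 1 (w : Int) 1).getLast? = some ((w : Int) - 1) := by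
  have h1 : ((w - 1 : Nat) : Int) = (w : Int) - 1 := by omega
  have h2 : (w : Int) = ((w - 1 : Nat) : Int) + 1 := by omega
  rw [h2, PySem.List.pyRange_one_succ_right (by omega), h1]
  simp

theorem pv_head_eval (r0 : String) (rest : List String) :
    (PySem.List.pyGet? (r0 :: rest) (0 : Int)).getD "" = r0 := by
  simp [PySem.List.pyGet?, PySem.List.pyIdx?]

-- the candidate column survives every row of the pattern
def pvGood (pattern : List String) (c : Int) : Bool :=
  pattern.all (fun row => pvMirror row c)

-- A under Pre_, in closed form: first breaking column, with A's fall-through fallback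
set_option maxHeartbeats 800000 in
theorem pv_A_eval (r0 : String) (rest : List String) (already : Int)
    (hw2 : 2 ≤ r0.toList.length) :
    find_col_symmetry (r0 :: rest) already
      = ((PySem.List.pyRange 1 (r0.toList.length : Int) 1).find?
          (fun c => pvGood (r0 :: rest) c && (already == 0 || c != already))).getD
        (if pvGood (r0 :: rest) ((r0.toList.length : Int) - 1)
         then (r0.toList.length : Int) - 1 else 0) := by
  simp only [find_col_symmetry]
  rw [pv_head_eval, PySem.Str.len_eq, pv_aLoop_char]
  rw [pv_find?_congr_mem (PySem.List.pyRange 1 (r0.toList.length : Int) 1)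
      (fun c => pvACheckRows c (r0 :: rest) && (already == 0 || c != already))
      (fun c => pvGood (r0 :: rest) c && (already == 0 || c != already))
      (fun x hx => by
        simp only [pv_checkRows_eq _ _ (PySem.List.mem_pyRange_one.mp hx).1]; rfl)]
  rw [pv_pyRange_getLast _ hw2]
  refine congrArg _ ?_
  show (if pvACheckRows ((r0.toList.length : Int) - 1) (r0 :: rest) then (r0.toList.length : Int) - 1 else 0) = _
  rw [pv_checkRows_eq _ _ (by omega)]
  rfl

-- B under Pre_, in closed form: first mirror column ≠ already
theorem pv_B_eval (r0 : String) (rest : List String) (already : Int) :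
    find_col_symmetry_alt (r0 :: rest) already
      = ((PySem.List.pyRange 1 (r0.toList.length : Int) 1).find?
          (fun c => pvGood (r0 :: rest) c && (c != already))).getD 0 := by
  simp only [find_col_symmetry_alt]
  rw [pv_head_eval, PySem.Str.len_eq, pv_foldl_filter, pv_firstNe_eq,
    pv_find?_filter (fun c => c != already) (fun c => (r0 :: rest).all (fun row => pvMirror row c))]
  rfl

-- bridge: B's Bool test equals the spec-level mirror condition
theorem pv_good_iff (rows : List String) (c : Int) (hc : 1 ≤ c) :
    pvGood rows c = true ↔ ∀ row ∈ rows, pvMirrorAt row.toList c.toNat := by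
  unfold pvGood
  rw [List.all_eq_true]
  constructor
  · intro h row hrow
    rw [pv_mirrorAt_iff_ptw]
    exact (pv_mirror_iff row c hc).mp (h row hrow)
  · intro h row hrow
    rw [pv_mirror_iff row c hc, ← pv_mirrorAt_iff_ptw]
    exact h row hrow

theorem pv_main (pattern : List String) (already : Int)
    (hpre : Pre_find_col_symmetry pattern already)
    (hnd : ¬ D_find_col_symmetry pattern already) :
    find_col_symmetry pattern already = find_col_symmetry_alt pattern already := by
  obtain ⟨hne, hw2'⟩ := hpre
  rcases pattern with _ | ⟨r0, rest⟩
  · exact absurd rfl hne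
  have hw2 : 2 ≤ r0.toList.length := by simpa using hw2'
  rw [pv_A_eval r0 rest already hw2, pv_B_eval r0 rest already]
  by_cases h0 : already = 0
  · subst h0
    rw [pv_find?_congr_mem (PySem.List.pyRange 1 (r0.toList.length : Int) 1)
        (fun c => pvGood (r0 :: rest) c && ((0 : Int) == 0 || c != 0))
        (fun c => pvGood (r0 :: rest) c)
        (fun x hx => by norm_num),
      pv_find?_congr_mem (PySem.List.pyRange 1 (r0.toList.length : Int) 1)
        (fun c => pvGood (r0 :: rest) c && (c != 0))
        (fun c => pvGood (r0 :: rest) c)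
        (fun x hx => by
          have h1 := (PySem.List.mem_pyRange_one.mp hx).1
          have h2 : (x != (0 : Int)) = true := bne_iff_ne.mpr (by omega)
          simp only [h2, Bool.and_true])]
    cases hf : (PySem.List.pyRange 1 (r0.toList.length : Int) 1).find?
        (fun c => pvGood (r0 :: rest) c) with
    | some v => rfl
    | none =>
      have hmem : ((r0.toList.length : Int) - 1) ∈ PySem.List.pyRange 1 (r0.toList.length : Int) 1 :=
        PySem.List.mem_pyRange_one.mpr ⟨by omega, by omega⟩
      have hgl : pvGood (r0 :: rest) ((r0.toList.length : Int) - 1) = false := by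
        have hno := List.find?_eq_none.mp hf _ hmem
        cases hv : pvGood (r0 :: rest) ((r0.toList.length : Int) - 1)
        · rfl
        · exact absurd hv hno
      rw [hgl]
      simp only [Option.getD_none, Bool.false_eq_true, if_false]
  · have hb0 : (already == (0 : Int)) = false := beq_eq_false_iff_ne.mpr h0
    rw [pv_find?_congr_mem (PySem.List.pyRange 1 (r0.toList.length : Int) 1)
        (fun c => pvGood (r0 :: rest) c && (already == 0 || c != already))
        (fun c => pvGood (r0 :: rest) c && (c != already))
        (fun x hx => by simp only [hb0, Bool.false_or])]
    cases hf : (PySem.List.pyRange 1 (r0.toList.length : Int) 1).find?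
        (fun c => pvGood (r0 :: rest) c && (c != already)) with
    | some v => rfl
    | none =>
      cases hgv : pvGood (r0 :: rest) ((r0.toList.length : Int) - 1) with
      | false => simp only [Option.getD_none, Bool.false_eq_true, if_false]
      | true =>
        exfalso
        apply hnd
        have hmemL : ((r0.toList.length : Int) - 1) ∈ PySem.List.pyRange 1 (r0.toList.length : Int) 1 :=
          PySem.List.mem_pyRange_one.mpr ⟨by omega, by omega⟩
        have hpredL := List.find?_eq_none.mp hf _ hmemL
        have halr : already = (r0.toList.length : Int) - 1 := by
          cases hne2 : (((r0.toList.length : Int) - 1) != already) with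
          | true => rw [hgv, hne2] at hpredL; simp at hpredL
          | false => exact (bne_eq_false_iff_eq.mp hne2).symm
        have hmirror := (pv_good_iff (r0 :: rest) ((r0.toList.length : Int) - 1) (by omega)).mp hgv
        rw [show ((r0.toList.length : Int) - 1).toNat = r0.toList.length - 1 from by omega] at hmirror
        simp only [D_find_col_symmetry, List.headD_cons]
        refine ⟨halr, ?_⟩
        intro cn hcn hc1
        have hcnw := List.mem_range.mp hcn
        constructor
        · intro hall
          by_contra hne3
          have hcnw2 : cn < r0.toList.length - 1 := by omega
          have hgc : pvGood (r0 :: rest) ((cn : Nat) : Int) = true := by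
            rw [pv_good_iff (r0 :: rest) ((cn : Nat) : Int) (by omega)]
            rwa [show ((cn : Nat) : Int).toNat = cn from by omega]
          have hmemc : ((cn : Nat) : Int) ∈ PySem.List.pyRange 1 (r0.toList.length : Int) 1 :=
            PySem.List.mem_pyRange_one.mpr ⟨by omega, by omega⟩
          have hpredc := List.find?_eq_none.mp hf _ hmemc
          have hnec : (((cn : Nat) : Int) != already) = true := by
            rw [halr]; exact bne_iff_ne.mpr (by omega)
          rw [hgc, hnec] at hpredc
          simp at hpredc
        · intro hce
          rw [hce]
          exact hmirror

-- ===== VERDICT (by name: the statement is the Claim_ definition above) =====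
theorem find_col_symmetry_spec : Claim_unchanged_find_col_symmetry := by
  intro pattern already _ hpre hnd
  exact pv_main pattern already hpre hnd

theorem find_col_symmetry_changed : Claim_changed_find_col_symmetry := by
  unfold Claim_changed_find_col_symmetry; decide

theorem find_col_symmetry_tight : Claim_exact_find_col_symmetry := by
  intro pattern already _ hpre hd
  obtain ⟨hne, hw2'⟩ := hpre
  rcases pattern with _ | ⟨r0, rest⟩
  · exact absurd rfl hne
  have hw2 : 2 ≤ r0.toList.length := by simpa using hw2'
  simp only [D_find_col_symmetry, List.headD_cons] at hd
  obtain ⟨halr, hiff⟩ := hd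
  rw [pv_A_eval r0 rest already hw2, pv_B_eval r0 rest already]
  have hgl : pvGood (r0 :: rest) ((r0.toList.length : Int) - 1) = true := by
    rw [pv_good_iff (r0 :: rest) ((r0.toList.length : Int) - 1) (by omega)]
    rw [show ((r0.toList.length : Int) - 1).toNat = r0.toList.length - 1 from by omega]
    exact (hiff (r0.toList.length - 1) (List.mem_range.mpr (by omega)) (by omega)).mpr rfl
  have hfB : (PySem.List.pyRange 1 (r0.toList.length : Int) 1).find?
      (fun c => pvGood (r0 :: rest) c && (c != already)) = none := by
    rw [List.find?_eq_none]
    intro x hx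
    obtain ⟨hx1, hxw⟩ := PySem.List.mem_pyRange_one.mp hx
    by_cases hxl : x = (r0.toList.length : Int) - 1
    · have hxe : (x != already) = false := bne_eq_false_iff_eq.mpr (by omega)
      simp [hxe]
    · cases hgx : pvGood (r0 :: rest) x with
      | false => simp
      | true =>
        exfalso
        have hmx := (pv_good_iff (r0 :: rest) x (by omega)).mp hgx
        have := (hiff x.toNat (List.mem_range.mpr (by omega)) (by omega)).mp hmx
        omega
  have hb0 : (already == (0 : Int)) = false := beq_eq_false_iff_ne.mpr (by omega)
  rw [pv_find?_congr_mem (PySem.List.pyRange 1 (r0.toList.length : Int) 1)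
      (fun c => pvGood (r0 :: rest) c && (already == 0 || c != already))
      (fun c => pvGood (r0 :: rest) c && (c != already))
      (fun x hx => by simp only [hb0, Bool.false_or])]
  rw [hfB, hgl]
  simp only [Option.getD_none, if_true]
  omega
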